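-- pv_equiv track=rewrite | github.com/Ev0b1t/DevRank | backend/app/services/github_service.py | _detect_repo_signals
-- ===== SOURCE A (Python) =====
-- from typing import Any, Dict, List, Optional
--
-- def _detect_repo_signals(paths: List[str]) -> Dict[str, bool]:
--     lower_paths = [path.lower() for path in paths]
--     return {
--         "has_tests": any(
--             "/test" in p or p.startswith("test") or "/spec" in p or p.startswith("spec") for p in lower_paths
--         ),
--         "has_ci": any(p.startswith(".github/workflows/") or "gitlab-ci" in p for p in lower_paths),
--         "has_readme": any(p == "readme.md" or p.endswith("/readme.md") for p in lower_paths),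
--         "has_docker": any(p == "dockerfile" or p.endswith("/dockerfile") for p in lower_paths),
--     }
-- ===== SOURCE B (Python) =====
-- from typing import Dict, List
--
-- def _detect_repo_signals(paths: List[str]) -> Dict[str, bool]:
--     has_tests = has_ci = has_readme = has_docker = False
--     for path in paths:
--         p = path.lower()
--         has_tests = has_tests or ("/test" in p or p.startswith("test") or "/spec" in p or p.startswith("spec"))
--         has_ci = has_ci or (p.startswith(".github/workflows/") or "gitlab-ci" in p)
--         has_readme = has_readme or (p == "readme.md" or p.endswith("/readme.md"))
--         has_docker = has_docker or (p == "dockerfile" or p.endswith("/dockerfile"))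
--     return {
--         "has_tests": has_tests,
--         "has_ci": has_ci,
--         "has_readme": has_readme,
--         "has_docker": has_docker,
--     }
-- ===== Notes on version B (the rewrite author's own statement) =====
-- stated objective: simpler
-- what changed: Replaces the list of lowered copies plus four independent any() passes with one single pass that lowercases each path once and ORs four boolean flags.
import Mathlib
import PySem

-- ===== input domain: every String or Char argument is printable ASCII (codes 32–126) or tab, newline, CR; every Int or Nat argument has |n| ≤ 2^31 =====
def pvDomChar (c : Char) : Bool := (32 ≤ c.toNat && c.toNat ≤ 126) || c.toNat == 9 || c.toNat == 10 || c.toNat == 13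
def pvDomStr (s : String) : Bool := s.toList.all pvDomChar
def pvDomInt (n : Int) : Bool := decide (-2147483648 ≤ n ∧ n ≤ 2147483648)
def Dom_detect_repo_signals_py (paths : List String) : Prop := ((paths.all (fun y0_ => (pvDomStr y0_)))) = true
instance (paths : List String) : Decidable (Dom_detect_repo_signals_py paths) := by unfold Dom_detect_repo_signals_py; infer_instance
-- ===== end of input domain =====

-- B folds over the raw paths once, lowercasing each path once and OR-ing four flags,
-- instead of A's lowered intermediate list plus four independent any() passes; objective: simpler.

-- ===== PORT A =====
def pvTestsPred (p : String) : Bool :=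
  PySem.Str.isIn "/test" p || PySem.Str.startswith p "test" ||
  PySem.Str.isIn "/spec" p || PySem.Str.startswith p "spec"
def pvCiPred (p : String) : Bool :=
  PySem.Str.startswith p ".github/workflows/" || PySem.Str.isIn "gitlab-ci" p
def pvReadmePred (p : String) : Bool :=
  p == "readme.md" || PySem.Str.endswith p "/readme.md"
def pvDockerPred (p : String) : Bool :=
  p == "dockerfile" || PySem.Str.endswith p "/dockerfile"

def detect_repo_signals_py (paths : List String) : List (String × Bool) :=
  let lower_paths := paths.map PySem.Str.lower
  [("has_tests", lower_paths.any pvTestsPred),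
   ("has_ci", lower_paths.any pvCiPred),
   ("has_readme", lower_paths.any pvReadmePred),
   ("has_docker", lower_paths.any pvDockerPred)]

-- ===== PORT B =====
def pvStepB (st : Bool × Bool × Bool × Bool) (path : String) : Bool × Bool × Bool × Bool :=
  let p := PySem.Str.lower path
  (st.1 || pvTestsPred p, st.2.1 || pvCiPred p, st.2.2.1 || pvReadmePred p, st.2.2.2 || pvDockerPred p)

def detect_repo_signals_py_alt (paths : List String) : List (String × Bool) :=
  let st := paths.foldl pvStepB (false, false, false, false)
  [("has_tests", st.1),
   ("has_ci", st.2.1),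
   ("has_readme", st.2.2.1),
   ("has_docker", st.2.2.2)]

-- ===== PRECONDITION & SPEC =====
def Spec_detect_repo_signals_py (paths : List String) (out : List (String × Bool)) : Prop := out = detect_repo_signals_py_alt paths
instance (paths : List String) (out : List (String × Bool)) : Decidable (Spec_detect_repo_signals_py paths out) := by unfold Spec_detect_repo_signals_py; infer_instance

-- ===== CLAIM (what is proved, stated in full; the proofs are below) =====
def Claim_equal_detect_repo_signals_py : Prop := ∀ (paths : List String), Dom_detect_repo_signals_py paths → Spec_detect_repo_signals_py paths (detect_repo_signals_py paths)

-- ===== LEMMAS AND PROOFS =====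
theorem pvFoldB_eq (paths : List String) (a b c d : Bool) :
    paths.foldl pvStepB (a, b, c, d) =
      (a || (paths.map PySem.Str.lower).any pvTestsPred,
       b || (paths.map PySem.Str.lower).any pvCiPred,
       c || (paths.map PySem.Str.lower).any pvReadmePred,
       d || (paths.map PySem.Str.lower).any pvDockerPred) := by
  induction paths generalizing a b c d with
  | nil => simp
  | cons x xs ih =>
    simp only [List.foldl_cons, List.map_cons, List.any_cons, pvStepB]
    rw [ih]
    simp [Bool.or_assoc]

-- ===== VERDICT (by name: the statement is the Claim_ definition above) =====
theorem detect_repo_signals_py_spec : Claim_equal_detect_repo_signals_py := by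
  intro paths _
  unfold Spec_detect_repo_signals_py detect_repo_signals_py detect_repo_signals_py_alt
  rw [pvFoldB_eq]
  simp
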